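-- pv_equiv track=rewrite | github.com/samarxie/Python-Machine-Learning-Homework | 20180410/lyrichu_20180410_02.py | solution
-- ===== SOURCE A (Python) =====
-- def solution(n):
-- 	# 动态规划求解
-- 	# n是第n天
-- 	s = [1]
-- 	rise_index = 1 # 涨的第多少天
-- 	days = 1 # 第多少天
-- 	while days < n:
-- 		index = rise_index
-- 		while index > 0:
-- 			s.append(s[-1]+1)
-- 			days += 1
-- 			index -= 1
-- 		s.append(s[-1]-1)
-- 		days += 1
-- 		rise_index += 1
-- 	return s[n-1]
-- ===== SOURCE B (Python) =====
-- def solution(n):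
--     # O(sqrt(n)) block jump: skip whole rise/drop rounds arithmetically instead of
--     # building the sequence element by element.
--     if n <= 1:
--         return 1
--     m = n - 2
--     c, r, b = 0, 1, 0
--     while c + r + 1 <= m:
--         c, r, b = c + r + 1, r + 1, b + r - 1
--     j = m - c
--     if j == r:
--         return 1 + b + (r - 1)
--     return 2 + b + j
-- ===== Notes on version B (the rewrite author's own statement) =====
-- stated objective: faster
-- what changed: Instead of building the whole sequence day by day in a list, B jumps over whole rise/drop rounds keeping only three running sums (round start offset, round number, round base value) and reads the answer off arithmetically.
import Mathlib
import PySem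

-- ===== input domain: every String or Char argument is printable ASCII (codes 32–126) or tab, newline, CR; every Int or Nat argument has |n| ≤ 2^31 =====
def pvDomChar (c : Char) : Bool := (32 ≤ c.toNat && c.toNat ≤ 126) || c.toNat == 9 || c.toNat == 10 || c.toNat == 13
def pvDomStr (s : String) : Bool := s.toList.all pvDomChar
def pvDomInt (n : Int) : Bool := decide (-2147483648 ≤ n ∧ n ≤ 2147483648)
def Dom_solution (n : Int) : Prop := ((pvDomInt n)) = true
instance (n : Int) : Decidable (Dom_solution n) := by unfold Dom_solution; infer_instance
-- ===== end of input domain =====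

-- B replaces A's day-by-day list construction by an O(sqrt n) jump over whole rise/drop
-- rounds carrying three running sums; equal return value wherever A returns (A raises IndexError on negative input).
-- The loops are ported with a Nat fuel that is provably sufficient (a totality guard only).

-- ===== PORT A =====
-- inner 'while index > 0' loop: appends s[-1]+1, bumps days (fuel: the loop runs index times)
def innerAGo (fuel : Nat) (s : List Int) (days index : Int) : List Int × Int :=
  match fuel with
  | 0 => (s, days)
  | Nat.succ f =>
    if 0 < index then
      innerAGo f (s ++ [PySem.List.pyGetD s (-1) 0 + 1]) (days + 1) (index - 1)
    else (s, days)

def innerA (s : List Int) (days index : Int) : List Int × Int :=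
  innerAGo index.toNat s days index

-- outer 'while days < n' loop (fuel: days strictly increases every iteration)
def outerAGo (fuel : Nat) (n : Int) (s : List Int) (days rise : Int) : List Int :=
  match fuel with
  | 0 => s
  | Nat.succ f =>
    if days < n then
      let p := innerA s days rise
      outerAGo f n (p.1 ++ [PySem.List.pyGetD p.1 (-1) 0 - 1]) (p.2 + 1) (rise + 1)
    else s

def outerA (n : Int) (s : List Int) (days rise : Int) : List Int :=
  outerAGo (n - days).toNat n s days rise

def solution (n : Int) : Int :=
  PySem.List.pyGetD (outerA n [1] 1 1) (n - 1) 0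

-- ===== PORT B =====
-- the 'while c + r + 1 <= m' loop of Source B (fuel: c grows by at least 2 per iteration)
def findBlockGo (fuel : Nat) (m c r b : Int) : Int × Int × Int :=
  match fuel with
  | 0 => (c, r, b)
  | Nat.succ f =>
    if c + r + 1 ≤ m then findBlockGo f m (c + r + 1) (r + 1) (b + r - 1) else (c, r, b)

def findBlock (m c r b : Int) : Int × Int × Int :=
  findBlockGo (m - c).toNat m c r b

def solution_alt (n : Int) : Int :=
  if n ≤ 1 then 1
  else
    let m := n - 2
    let t := findBlock m 0 1 0
    let j := m - t.1
    if j = t.2.1 then 1 + t.2.2 + (t.2.1 - 1) else 2 + t.2.2 + j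

-- ===== PRECONDITION & SPEC =====
-- Pre_ excludes exactly the negative inputs, where A raises IndexError (negative index past the one-element list).
def Pre_solution (n : Int) : Prop := 0 ≤ n
instance (n : Int) : Decidable (Pre_solution n) := by unfold Pre_solution; infer_instance
def pvWitness_solution : Int := 5

def Spec_solution (n : Int) (out : Int) : Prop := out = solution_alt n
instance (n : Int) (out : Int) : Decidable (Spec_solution n out) := by unfold Spec_solution; infer_instance

-- ===== CLAIM (what is proved, stated in full; the proofs are below) =====
def Claim_equal_solution : Prop := ∀ (n : Int), Dom_solution n → Pre_solution n → Spec_solution n (solution n)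

-- ===== LEMMAS AND PROOFS =====

-- fuel-irrelevance and one-step unfolding for the three loops

theorem innerA_stop (s : List Int) (days index : Int) (h : ¬ 0 < index) :
    innerA s days index = (s, days) := by
  unfold innerA
  have h0 : index.toNat = 0 := by omega
  rw [h0, innerAGo]

theorem innerA_step (s : List Int) (days index : Int) (h : 0 < index) :
    innerA s days index
      = innerA (s ++ [PySem.List.pyGetD s (-1) 0 + 1]) (days + 1) (index - 1) := by
  unfold innerA
  have h0 : index.toNat = (index - 1).toNat + 1 := by omega
  rw [h0, innerAGo]
  simp only [if_pos h]

theorem innerAGo_days_le (f : Nat) : ∀ (s : List Int) (days index : Int),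
    days ≤ (innerAGo f s days index).2 := by
  induction f with
  | zero => intro s days index; rfl
  | succ f ih =>
    intro s days index
    rw [innerAGo]
    by_cases h : 0 < index
    · simp only [if_pos h]
      have := ih (s ++ [PySem.List.pyGetD s (-1) 0 + 1]) (days + 1) (index - 1)
      omega
    · simp only [if_neg h]
      exact le_rfl

theorem innerA_days_le (s : List Int) (days index : Int) : days ≤ (innerA s days index).2 :=
  innerAGo_days_le index.toNat s days index

theorem outerAGo_irrel (f : Nat) : ∀ (g : Nat) (n : Int) (s : List Int) (days rise : Int),
    (n - days).toNat ≤ f → (n - days).toNat ≤ g →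
    outerAGo f n s days rise = outerAGo g n s days rise := by
  induction f with
  | zero =>
    intro g n s days rise hf hg
    have h : ¬ days < n := by omega
    cases g with
    | zero => rfl
    | succ g => rw [outerAGo, outerAGo]; simp only [if_neg h]
  | succ f ih =>
    intro g n s days rise hf hg
    by_cases h : days < n
    · cases g with
      | zero => omega
      | succ g =>
        rw [outerAGo, outerAGo]
        simp only [if_pos h]
        have hd := innerA_days_le s days rise
        exact ih g n _ _ _ (by omega) (by omega)
    · cases g with
      | zero => rw [outerAGo, outerAGo]; simp only [if_neg h]
      | succ g => rw [outerAGo, outerAGo]; simp only [if_neg h]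

theorem outerA_stop (n : Int) (s : List Int) (days rise : Int) (h : ¬ days < n) :
    outerA n s days rise = s := by
  unfold outerA
  have h0 : (n - days).toNat = 0 := by omega
  rw [h0, outerAGo]

theorem outerA_step (n : Int) (s : List Int) (days rise : Int) (h : days < n) :
    outerA n s days rise
      = outerA n ((innerA s days rise).1
            ++ [PySem.List.pyGetD (innerA s days rise).1 (-1) 0 - 1])
          ((innerA s days rise).2 + 1) (rise + 1) := by
  unfold outerA
  have hd := innerA_days_le s days rise
  have h0 : (n - days).toNat = ((n - days).toNat - 1) + 1 := by omega
  rw [h0, outerAGo]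
  simp only [if_pos h]
  exact outerAGo_irrel _ _ n _ _ _ (by omega) (by omega)

theorem findBlockGo_stop (f : Nat) (m c r b : Int) (h : ¬ c + r + 1 ≤ m) :
    findBlockGo f m c r b = (c, r, b) := by
  cases f with
  | zero => rfl
  | succ f => rw [findBlockGo]; simp only [if_neg h]

theorem findBlockGo_irrel (f : Nat) : ∀ (g : Nat) (m c r b : Int), 1 ≤ r →
    m - c ≤ 2 * (f : Int) → m - c ≤ 2 * (g : Int) →
    findBlockGo f m c r b = findBlockGo g m c r b := by
  induction f with
  | zero =>
    intro g m c r b hr hf hg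
    have h : ¬ c + r + 1 ≤ m := by omega
    rw [findBlockGo_stop _ _ _ _ _ h, findBlockGo_stop _ _ _ _ _ h]
  | succ f ih =>
    intro g m c r b hr hf hg
    by_cases h : c + r + 1 ≤ m
    · cases g with
      | zero => omega
      | succ g =>
        rw [findBlockGo, findBlockGo]
        simp only [if_pos h]
        exact ih g m _ _ _ (by omega) (by omega) (by omega)
    · rw [findBlockGo_stop _ _ _ _ _ h, findBlockGo_stop _ _ _ _ _ h]

theorem findBlock_stop (m c r b : Int) (h : ¬ c + r + 1 ≤ m) : findBlock m c r b = (c, r, b) := by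
  unfold findBlock
  exact findBlockGo_stop _ _ _ _ _ h

theorem findBlock_step (m c r b : Int) (hr : 1 ≤ r) (h : c + r + 1 ≤ m) :
    findBlock m c r b = findBlock m (c + r + 1) (r + 1) (b + r - 1) := by
  unfold findBlock
  have h0 : (m - c).toNat = ((m - c).toNat - 1) + 1 := by omega
  rw [h0, findBlockGo]
  simp only [if_pos h]
  exact findBlockGo_irrel _ _ m _ _ _ (by omega) (by omega) (by omega)

theorem findBlock_reach (r : Int) (hr : 1 ≤ r) :
    ∀ c b m : Int, 2 * c = (r - 1) * (r + 2) → 2 * b = (r - 1) * (r - 2) → c ≤ m →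
      findBlock m 0 1 0 = findBlock m c r b := by
  induction r, hr using Int.le_induction with
  | base =>
    intro c b m hc hb _
    have hc0 : c = 0 := by omega
    have hb0 : b = 0 := by omega
    rw [hc0, hb0]
  | succ r hr ih =>
    intro c b m hc hb hcm
    have hc' : 2 * (c - r - 1) = (r - 1) * (r + 2) := by linear_combination hc
    have hb' : 2 * (b - r + 1) = (r - 1) * (r - 2) := by linear_combination hb
    have h := ih (c - r - 1) (b - r + 1) m hc' hb' (by omega)
    rw [h, findBlock_step m (c - r - 1) r (b - r + 1) hr (by omega)]
    have e1 : c - r - 1 + r + 1 = c := by ring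
    have e2 : b - r + 1 + r - 1 = b := by ring
    rw [e1, e2]

theorem findBlock_eval (m c r b : Int) (hr : 1 ≤ r)
    (hc : 2 * c = (r - 1) * (r + 2)) (hb : 2 * b = (r - 1) * (r - 2))
    (h1 : c ≤ m) (h2 : m ≤ c + r) : findBlock m 0 1 0 = (c, r, b) := by
  rw [findBlock_reach r hr c b m hc hb h1, findBlock_stop m c r b (by omega)]

theorem c_nonneg (c r : Int) (hr : 1 ≤ r) (hc : 2 * c = (r - 1) * (r + 2)) : 0 ≤ c := by
  have : 0 ≤ (r - 1) * (r + 2) := mul_nonneg (by omega) (by omega)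
  omega

theorem alt_val (m c r b j : Int) (hr : 1 ≤ r)
    (hc : 2 * c = (r - 1) * (r + 2)) (hb : 2 * b = (r - 1) * (r - 2))
    (hj0 : 0 ≤ j) (hjr : j ≤ r) (hm : m = c + j) :
    solution_alt (m + 2) = if j = r then 1 + b + (r - 1) else 2 + b + j := by
  have hc0 : 0 ≤ c := c_nonneg c r hr hc
  simp only [solution_alt]
  rw [if_neg (by omega)]
  simp only [show m + 2 - 2 = m from by ring,
    findBlock_eval m c r b hr hc hb (by omega) (by omega),
    show m - c = j from by omega]

theorem alt_one : solution_alt 1 = 1 := by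
  unfold solution_alt; norm_num

-- invariant through the inner (rise) loop
theorem inner_inv (fuel : Nat) : ∀ (s : List Int) (days index c r b : Int),
    index.toNat ≤ fuel → 0 ≤ index → index ≤ r → 1 ≤ r →
    2 * c = (r - 1) * (r + 2) → 2 * b = (r - 1) * (r - 2) →
    days = (s.length : Int) → (s.length : Int) = 1 + c + (r - index) →
    (∀ k : Nat, k < s.length → s.getD k 0 = solution_alt ((k : Int) + 1)) →
    (innerA s days index).2 = ((innerA s days index).1.length : Int) ∧
    ((innerA s days index).1.length : Int) = 1 + c + r ∧
    ∀ k : Nat, k < (innerA s days index).1.length →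
      (innerA s days index).1.getD k 0 = solution_alt ((k : Int) + 1) := by
  induction fuel with
  | zero =>
    intro s days index c r b hfuel h0 hir hr hc hb hd hl helem
    have hz : ¬ 0 < index := by omega
    rw [innerA_stop s days index hz]
    refine ⟨hd, ?_, helem⟩
    show (s.length : Int) = 1 + c + r
    omega
  | succ fuel ih =>
    intro s days index c r b hfuel h0 hir hr hc hb hd hl helem
    by_cases h : 0 < index
    case neg =>
      rw [innerA_stop s days index h]
      refine ⟨hd, ?_, helem⟩
      show (s.length : Int) = 1 + c + r
      omega
    case pos =>
    have hc0 : 0 ≤ c := c_nonneg c r hr hc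
    have hlen1 : 1 ≤ s.length := by omega
    have hne : s ≠ [] := by
      intro hnil; rw [hnil] at hlen1; simp at hlen1
    -- the last element of s
    have hlast : PySem.List.pyGetD s (-1) 0 = s.getD (s.length - 1) 0 := by
      rw [PySem.List.pyGetD_neg_one s 0 hne, List.getLast_eq_getElem]
      rw [List.getD_eq_getElem s 0 (by omega)]
    have hlastval : PySem.List.pyGetD s (-1) 0 = solution_alt ((s.length : Int)) := by
      rw [hlast, helem (s.length - 1) (by omega)]
      congr 1
      omega
    -- value of the newly appended element
    have hnew : PySem.List.pyGetD s (-1) 0 + 1 = solution_alt ((s.length : Int) + 1) := by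
      have hml : (s.length : Int) + 1 = (c + (r - index)) + 2 := by omega
      rw [hml, alt_val (c + (r - index)) c r b (r - index) hr hc hb (by omega) (by omega) rfl,
        if_neg (by omega)]
      by_cases hone : (s.length : Int) = 1
      · -- previous element is day 1, value 1
        have hczero : c = 0 := by omega
        have hr1 : r = 1 := by
          have h0' : (r - 1) * (r + 2) = 0 := by omega
          rcases mul_eq_zero.mp h0' with h' | h' <;> omega
        subst hr1
        have hb0 : b = 0 := by
          norm_num at hb; omega
        rw [hlastval, hone, alt_one]
        omega
      · have hml2 : (s.length : Int) = (c + (r - index) - 1) + 2 := by omega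
        by_cases hix : index = r
        · -- previous element is the drop of round r-1
          have hcpos : 1 ≤ c := by omega
          have hr2 : 2 ≤ r := by
            rcases (by omega : r = 1 ∨ 2 ≤ r) with h1 | h2
            · exfalso; subst h1; norm_num at hc; omega
            · exact h2
          rw [hlastval, hml2,
            alt_val (c + (r - index) - 1) (c - r) (r - 1) (b - r + 2) (r - 1 - 1 + 1) (by omega)
              (by linear_combination hc) (by linear_combination hb) (by omega) (by omega) (by omega)]
          rw [if_pos (by omega)]
          omega
        · -- previous element is inside round r
          rw [hlastval, hml2,
            alt_val (c + (r - index) - 1) c r b (r - index - 1) hr hc hb (by omega) (by omega)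
              (by omega), if_neg (by omega)]
          omega
    rw [innerA_step s days index h]
    exact ih _ _ _ c r b (by omega) (by omega) (by omega) hr hc hb
      (by simp; omega)
      (by simp; omega)
      (by
        intro k hk
        simp only [List.length_append, List.length_cons, List.length_nil] at hk
        by_cases hks : k < s.length
        · rw [List.getD_append _ _ _ _ hks]
          exact helem k hks
        · have hkeq : k = s.length := by omega
          subst hkeq
          rw [List.getD_append_right _ _ _ _ (le_refl _)]
          simpa using hnew)

-- invariant through the outer loop
theorem outer_inv (fuel : Nat) : ∀ (n : Int) (s : List Int) (days rise c b : Int),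
    (n - days).toNat ≤ fuel → 1 ≤ rise →
    2 * c = (rise - 1) * (rise + 2) → 2 * b = (rise - 1) * (rise - 2) →
    days = (s.length : Int) → (s.length : Int) = 1 + c →
    (∀ k : Nat, k < s.length → s.getD k 0 = solution_alt ((k : Int) + 1)) →
    n ≤ ((outerA n s days rise).length : Int) ∧
    ∀ k : Nat, k < (outerA n s days rise).length →
      (outerA n s days rise).getD k 0 = solution_alt ((k : Int) + 1) := by
  induction fuel with
  | zero =>
    intro n s days rise c b hfuel hr hc hb hd hl helem
    have h : ¬ days < n := by omega
    rw [outerA_stop n s days rise h]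
    exact ⟨by omega, helem⟩
  | succ fuel ih =>
    intro n s days rise c b hfuel hr hc hb hd hl helem
    by_cases h : days < n
    case neg =>
      rw [outerA_stop n s days rise h]
      exact ⟨by omega, helem⟩
    case pos =>
    obtain ⟨hd1, hl1, he1⟩ :=
      inner_inv rise.toNat s days rise c rise b le_rfl (by omega) le_rfl hr hc hb hd
        (by omega) helem
    have hc0 : 0 ≤ c := c_nonneg c rise hr hc
    have hlen1 : 1 ≤ (innerA s days rise).1.length := by omega
    have hne : (innerA s days rise).1 ≠ [] := by
      intro hnil
      rw [hnil] at hlen1; simp at hlen1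
    have hlast : PySem.List.pyGetD (innerA s days rise).1 (-1) 0
        = (innerA s days rise).1.getD ((innerA s days rise).1.length - 1) 0 := by
      rw [PySem.List.pyGetD_neg_one (innerA s days rise).1 0 hne, List.getLast_eq_getElem]
      rw [List.getD_eq_getElem (innerA s days rise).1 0 (by omega)]
    have hlastval : PySem.List.pyGetD (innerA s days rise).1 (-1) 0
        = solution_alt (((innerA s days rise).1.length : Int)) := by
      rw [hlast, he1 ((innerA s days rise).1.length - 1) (by omega)]
      congr 1
      omega
    -- the appended drop element
    have hnew : PySem.List.pyGetD (innerA s days rise).1 (-1) 0 - 1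
        = solution_alt (((innerA s days rise).1.length : Int) + 1) := by
      have hml : ((innerA s days rise).1.length : Int) + 1 = (c + rise) + 2 := by omega
      have hml2 : ((innerA s days rise).1.length : Int) = (c + rise - 1) + 2 := by omega
      rw [hml, alt_val (c + rise) c rise b rise hr hc hb (by omega) le_rfl rfl, if_pos rfl]
      rw [hlastval, hml2,
        alt_val (c + rise - 1) c rise b (rise - 1) hr hc hb (by omega) (by omega) (by omega),
        if_neg (by omega)]
      omega
    rw [outerA_step n s days rise h]
    exact ih n _ _ _ (c + rise + 1) (b + rise - 1)
      (by omega) (by omega) (by linear_combination hc)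
      (by linear_combination hb) (by simp; omega) (by simp; omega)
      (by
        intro k hk
        simp only [List.length_append, List.length_cons, List.length_nil] at hk
        by_cases hks : k < (innerA s days rise).1.length
        · rw [List.getD_append _ _ _ _ hks]
          exact he1 k hks
        · have hkeq : k = (innerA s days rise).1.length := by omega
          subst hkeq
          rw [List.getD_append_right _ _ _ _ (le_refl _)]
          simpa using hnew)

-- ===== VERDICT (by name: the statement is the Claim_ definition above) =====
theorem solution_spec : Claim_equal_solution := by
  intro n _ hpre
  unfold Spec_solution solution
  have hn : 0 ≤ n := hpre
  rcases (by omega : n = 0 ∨ n = 1 ∨ 2 ≤ n) with h0 | h1 | h2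
  · subst h0
    rw [outerA_stop _ _ _ _ (by omega)]
    decide
  · subst h1
    rw [outerA_stop _ _ _ _ (by omega)]
    decide
  · have hout := outer_inv (n - 1).toNat n [1] 1 1 0 0 (by omega) le_rfl (by norm_num)
      (by norm_num) (by simp) (by simp)
      (by
        intro k hk
        simp only [List.length_cons, List.length_nil] at hk
        have hk0 : k = 0 := by omega
        subst hk0
        simpa using alt_one.symm)
    obtain ⟨hlen, helem⟩ := hout
    have h01 : 0 ≤ n - 1 := by omega
    have hlt : n - 1 < ((outerA n [1] 1 1).length : Int) := by omega
    rw [PySem.List.pyGetD_eq_getElem _ 0 h01 hlt]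
    have := helem (n - 1).toNat (by omega)
    rw [List.getD_eq_getElem _ _ (by omega)] at this
    rw [this]
    congr 1
    omega
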